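-- pv_equiv track=rewrite | github.com/ramrow/controlled_dataset_branching | map_cases_to_tutorials.py | group_case_requirements
-- ===== SOURCE A (Python) =====
-- from collections import defaultdict
--
-- def group_case_requirements(rows):
--     grp = defaultdict(list)
--     for r in rows:
--         cn = (r.get('case_name') or '').strip()
--         if cn:
--             grp[cn].append(r)
--     out = {}
--     for cn, rs in grp.items():
--         req_counts = defaultdict(int)
--         for r in rs:
--             req = (r.get('user_requirement') or '').strip()
--             if req:
--                 req_counts[req] += 1
--         req = max(req_counts.items(), key=lambda kv: kv[1])[0] if req_counts else ''
--         out[cn] = req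
--     return out
-- ===== SOURCE B (Python) =====
-- def group_case_requirements(rows):
--     # One pass: per case_name keep a running count table of requirements,
--     # then pick each table's first-maximal key.
--     grp = {}
--     for r in rows:
--         cn = (r.get('case_name') or '').strip()
--         if not cn:
--             continue
--         counts = grp.setdefault(cn, {})
--         req = (r.get('user_requirement') or '').strip()
--         if req:
--             counts[req] = counts.get(req, 0) + 1
--     out = {}
--     for cn, counts in grp.items():
--         out[cn] = max(counts.items(), key=lambda kv: kv[1])[0] if counts else ''
--     return out
-- ===== Notes on version B (the rewrite author's own statement) =====
-- stated objective: alternative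
-- what changed: Replaces the group-rows-then-recount two-phase algorithm by a single accumulating pass that keeps a running requirement count table per case name, followed by a selection pass over the tables; memory drops since grouped rows are never stored.
import Mathlib
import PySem

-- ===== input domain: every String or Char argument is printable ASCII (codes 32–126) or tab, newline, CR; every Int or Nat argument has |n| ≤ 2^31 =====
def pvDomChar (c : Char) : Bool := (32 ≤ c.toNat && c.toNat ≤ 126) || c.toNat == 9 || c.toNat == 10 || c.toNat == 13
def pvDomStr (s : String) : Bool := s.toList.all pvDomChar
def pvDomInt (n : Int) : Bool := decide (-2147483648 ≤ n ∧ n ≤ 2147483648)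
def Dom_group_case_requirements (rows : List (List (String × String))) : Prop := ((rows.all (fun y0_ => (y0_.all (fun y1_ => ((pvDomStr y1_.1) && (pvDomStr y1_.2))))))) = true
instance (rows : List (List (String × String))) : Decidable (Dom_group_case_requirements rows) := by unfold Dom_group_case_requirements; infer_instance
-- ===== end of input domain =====

-- B replaces A's group-rows-then-recount two-phase algorithm by a single pass that
-- accumulates a per-case requirement count table, then selects each table's first-maximal key.

-- (r.get(k) or '') for a string-valued row dict: missing key and '' both yield ''
def pvGetOrEmpty (r : List (String × String)) (k : String) : String :=
  PySem.Dict.getD (PySem.Dict.mk r) k ""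

-- ===== PORT A =====
def group_case_requirements (rows : List (List (String × String))) : List (String × String) :=
  let grp : PySem.Dict String (List (List (String × String))) :=
    rows.foldl (fun grp r =>
      let cn := PySem.Str.strip (pvGetOrEmpty r "case_name")
      if cn = "" then grp
      else PySem.Dict.modify grp cn [] (fun rs => rs ++ [r])) PySem.Dict.empty
  let out : PySem.Dict String String :=
    grp.items.foldl (fun out p =>
      let req_counts : PySem.Dict String Int :=
        p.2.foldl (fun d r =>
          let req := PySem.Str.strip (pvGetOrEmpty r "user_requirement")
          if req = "" then d
          else PySem.Dict.modify d req 0 (fun c => c + 1)) PySem.Dict.empty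
      let req := match PySem.List.max? req_counts.items (fun kv => kv.2) with
        | some kv => kv.1
        | none => ""
      PySem.Dict.insert out p.1 req) PySem.Dict.empty
  out.items

-- ===== PORT B =====
def group_case_requirements_alt (rows : List (List (String × String))) : List (String × String) :=
  let grp : PySem.Dict String (PySem.Dict String Int) :=
    rows.foldl (fun grp r =>
      let cn := PySem.Str.strip (pvGetOrEmpty r "case_name")
      if cn = "" then grp
      else
        let counts := PySem.Dict.getD grp cn PySem.Dict.empty
        let req := PySem.Str.strip (pvGetOrEmpty r "user_requirement")
        let counts' := if req = "" then counts
          else PySem.Dict.insert counts req (PySem.Dict.getD counts req 0 + 1)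
        PySem.Dict.insert grp cn counts') PySem.Dict.empty
  let out : PySem.Dict String String :=
    grp.items.foldl (fun out p =>
      let req := match PySem.List.max? (PySem.Dict.items p.2) (fun kv => kv.2) with
        | some kv => kv.1
        | none => ""
      PySem.Dict.insert out p.1 req) PySem.Dict.empty
  out.items

-- ===== PRECONDITION & SPEC =====
def Spec_group_case_requirements (rows : List (List (String × String))) (out : List (String × String)) : Prop := out = group_case_requirements_alt rows
instance (rows : List (List (String × String))) (out : List (String × String)) : Decidable (Spec_group_case_requirements rows out) := by unfold Spec_group_case_requirements; infer_instance

-- ===== CLAIM (what is proved, stated in full; the proofs are below) =====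
def Claim_equal_group_case_requirements : Prop := ∀ (rows : List (List (String × String))), Dom_group_case_requirements rows → Spec_group_case_requirements rows (group_case_requirements rows)


-- ===== LEMMAS AND PROOFS =====

-- A's inner counting step (defeq to both A's inner-loop body and B's per-row counter update)
def pvCountStep (d : PySem.Dict String Int) (r : List (String × String)) : PySem.Dict String Int :=
  let req := PySem.Str.strip (pvGetOrEmpty r "user_requirement")
  if req = "" then d else PySem.Dict.modify d req 0 (fun c => c + 1)

def pvCount (rs : List (List (String × String))) : PySem.Dict String Int :=
  rs.foldl pvCountStep PySem.Dict.empty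

-- the value-wise correspondence between A's grouped rows and B's count tables
def pvF (p : String × List (List (String × String))) : String × PySem.Dict String Int :=
  (p.1, pvCount p.2)

def pvStepA (grp : PySem.Dict String (List (List (String × String)))) (r : List (String × String)) :
    PySem.Dict String (List (List (String × String))) :=
  let cn := PySem.Str.strip (pvGetOrEmpty r "case_name")
  if cn = "" then grp else PySem.Dict.modify grp cn [] (fun rs => rs ++ [r])

def pvStepB (grp : PySem.Dict String (PySem.Dict String Int)) (r : List (String × String)) :
    PySem.Dict String (PySem.Dict String Int) :=
  let cn := PySem.Str.strip (pvGetOrEmpty r "case_name")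
  if cn = "" then grp
  else
    let counts := PySem.Dict.getD grp cn PySem.Dict.empty
    let req := PySem.Str.strip (pvGetOrEmpty r "user_requirement")
    let counts' := if req = "" then counts
      else PySem.Dict.insert counts req (PySem.Dict.getD counts req 0 + 1)
    PySem.Dict.insert grp cn counts'

lemma pvGet?_map (l : List (String × List (List (String × String)))) (cn : String) :
    (PySem.Dict.mk (l.map pvF)).get? cn = ((PySem.Dict.mk l).get? cn).map pvCount := by
  simp [PySem.Dict.get?, List.find?_map, Function.comp_def, pvF, Option.map_map]

lemma pvContains_map (l : List (String × List (List (String × String)))) (cn : String) :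
    (PySem.Dict.mk (l.map pvF)).contains cn = (PySem.Dict.mk l).contains cn := by
  simp [PySem.Dict.contains, List.any_map, Function.comp_def, pvF]

lemma pvGetD_map (gA : PySem.Dict String (List (List (String × String)))) (cn : String) :
    (PySem.Dict.mk (gA.items.map pvF)).getD cn PySem.Dict.empty = pvCount (gA.getD cn []) := by
  have h := pvGet?_map gA.items cn
  simp only [PySem.Dict.getD]
  rw [show (PySem.Dict.mk gA.items) = gA from rfl] at h
  rw [h]
  cases gA.get? cn <;> rfl

lemma pvInsert_map (gA : PySem.Dict String (List (List (String × String)))) (cn : String)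
    (v : List (List (String × String))) :
    (PySem.Dict.mk (gA.items.map pvF)).insert cn (pvCount v)
      = PySem.Dict.mk (((gA.insert cn v).items).map pvF) := by
  have hc := pvContains_map gA.items cn
  rw [show (PySem.Dict.mk gA.items) = gA from rfl] at hc
  by_cases h : gA.contains cn = true
  · simp only [PySem.Dict.insert, hc, h, if_pos]
    apply PySem.Dict.ext
    simp only [List.map_map]
    apply List.map_congr_left
    intro p _
    by_cases hp : p.1 = cn <;> simp [pvF, hp]
  · rw [Bool.not_eq_true] at h
    simp only [PySem.Dict.insert, hc, h, Bool.false_eq_true, if_false]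
    apply PySem.Dict.ext
    simp [pvF]

lemma pvCount_append (rs : List (List (String × String))) (r : List (String × String)) :
    pvCount (rs ++ [r]) = pvCountStep (pvCount rs) r := by
  simp [pvCount, List.foldl_append]

lemma pv_step (gA : PySem.Dict String (List (List (String × String)))) (r : List (String × String)) :
    pvStepB (PySem.Dict.mk (gA.items.map pvF)) r = PySem.Dict.mk ((pvStepA gA r).items.map pvF) := by
  unfold pvStepA pvStepB
  by_cases hcn : PySem.Str.strip (pvGetOrEmpty r "case_name") = ""
  · simp only [hcn, if_pos]
  · simp only [hcn, if_false, pvGetD_map]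
    have hmod : PySem.Dict.modify gA (PySem.Str.strip (pvGetOrEmpty r "case_name")) [] (fun rs => rs ++ [r])
        = gA.insert (PySem.Str.strip (pvGetOrEmpty r "case_name"))
            (gA.getD (PySem.Str.strip (pvGetOrEmpty r "case_name")) [] ++ [r]) := rfl
    rw [hmod]
    have hcounts : (if PySem.Str.strip (pvGetOrEmpty r "user_requirement") = "" then
          pvCount (gA.getD (PySem.Str.strip (pvGetOrEmpty r "case_name")) [])
        else
          PySem.Dict.insert (pvCount (gA.getD (PySem.Str.strip (pvGetOrEmpty r "case_name")) []))
            (PySem.Str.strip (pvGetOrEmpty r "user_requirement"))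
            (PySem.Dict.getD (pvCount (gA.getD (PySem.Str.strip (pvGetOrEmpty r "case_name")) []))
              (PySem.Str.strip (pvGetOrEmpty r "user_requirement")) 0 + 1))
        = pvCount (gA.getD (PySem.Str.strip (pvGetOrEmpty r "case_name")) [] ++ [r]) := by
      rw [pvCount_append]; rfl
    rw [hcounts]
    exact pvInsert_map gA _ _

lemma pv_fold (rows : List (List (String × String))) :
    ∀ gA : PySem.Dict String (List (List (String × String))),
      rows.foldl pvStepB (PySem.Dict.mk (gA.items.map pvF))
        = PySem.Dict.mk ((rows.foldl pvStepA gA).items.map pvF) := by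
  induction rows with
  | nil => intro gA; rfl
  | cons r rows ih =>
    intro gA
    simp only [List.foldl_cons, pv_step]
    exact ih (pvStepA gA r)

def pvOutStepB (out : PySem.Dict String String) (p : String × PySem.Dict String Int) :
    PySem.Dict String String :=
  let req := match PySem.List.max? (PySem.Dict.items p.2) (fun kv => kv.2) with
    | some kv => kv.1
    | none => ""
  PySem.Dict.insert out p.1 req

lemma pv_main (rows : List (List (String × String))) :
    group_case_requirements rows = group_case_requirements_alt rows := by
  show ((rows.foldl pvStepA PySem.Dict.empty).items.foldl
          (fun out p => pvOutStepB out (pvF p)) PySem.Dict.empty).items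
     = ((rows.foldl pvStepB PySem.Dict.empty).items.foldl pvOutStepB PySem.Dict.empty).items
  have h0 : (PySem.Dict.empty : PySem.Dict String (PySem.Dict String Int))
      = PySem.Dict.mk (((PySem.Dict.empty : PySem.Dict String (List (List (String × String)))).items).map pvF) := rfl
  rw [h0, pv_fold rows PySem.Dict.empty]
  rw [show (PySem.Dict.mk ((rows.foldl pvStepA PySem.Dict.empty).items.map pvF)).items
      = (rows.foldl pvStepA PySem.Dict.empty).items.map pvF from rfl]
  rw [List.foldl_map]

-- ===== VERDICT (by name: the statement is the Claim_ definition above) =====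
theorem group_case_requirements_spec : Claim_equal_group_case_requirements := by
  intro rows _
  show group_case_requirements rows = group_case_requirements_alt rows
  exact pv_main rows
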